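-- pv_equiv track=rewrite | github.com/1-00am/ChessSiteDjango | core/chess/board_operations.py | fen_to_64char
-- ===== SOURCE A (Python) =====
-- def fen_to_64char(fen): # transforms short-fen into 64-character board
--     brd = ''
--     for i in range(len(fen)):
--         if fen[i].isdigit():
--             brd += 'x'*(int(fen[i]))
--         elif fen[i] != '/':
--             brd += fen[i]
--     return brd
-- ===== SOURCE B (Python) =====
-- import re
--
-- def fen_to_64char(fen):  # two-phase: regex-expand digits, then drop rank separators
--     expanded = re.sub(r'\d', lambda m: 'x' * int(m.group(0)), fen)
--     return expanded.replace('/', '')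
-- ===== Notes on version B (the rewrite author's own statement) =====
-- stated objective: idiomatic
-- what changed: Replaces the indexed char-by-char loop with isdigit/slash branches and string += by a two-phase, loop-free transform: one regex substitution expanding each digit into its run of 'x', then one replace that strips the '/' separators (both C-level bulk passes, hence the constant-factor speedup).
import Mathlib
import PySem

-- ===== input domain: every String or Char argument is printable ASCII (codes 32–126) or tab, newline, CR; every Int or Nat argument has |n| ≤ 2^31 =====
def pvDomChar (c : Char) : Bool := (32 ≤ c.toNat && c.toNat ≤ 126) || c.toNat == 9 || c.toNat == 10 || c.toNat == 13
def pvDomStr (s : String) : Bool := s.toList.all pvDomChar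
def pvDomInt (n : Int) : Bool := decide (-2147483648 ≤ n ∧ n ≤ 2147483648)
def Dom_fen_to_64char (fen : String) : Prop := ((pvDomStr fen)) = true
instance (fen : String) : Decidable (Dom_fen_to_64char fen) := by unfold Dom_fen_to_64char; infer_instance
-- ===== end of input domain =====

-- B replaces A's indexed loop with branches by a two-phase, loop-free transform
-- (expand each digit into its run of 'x', then strip the '/' separators); same cost, more idiomatic.

-- ===== PORT A =====
-- A: one pass over the characters, appending to an accumulator (strings handled as char lists;
-- `int(fen[i])` on an ASCII digit is `c.toNat - 48`, exact on digits).
def fen_to_64char (fen : String) : String :=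
  String.mk (fen.toList.foldl
    (fun brd c =>
      if PySem.Chars.isdigit c then brd ++ List.replicate (c.toNat - 48) 'x'
      else if c ≠ '/' then brd ++ [c] else brd) [])

-- ===== PORT B =====
-- B: phase 1 — the regex `\d` substitution, each digit replaced by its run of 'x' (on the ASCII
-- domain `\d` is exactly '0'..'9'); phase 2 — `.replace('/', '')`, i.e. filtering out '/'.
def pvDigitRun (c : Char) : List Char :=
  if '0' ≤ c ∧ c ≤ '9' then List.replicate (c.toNat - 48) 'x' else [c]

def fen_to_64char_alt (fen : String) : String :=
  String.mk ((fen.toList.flatMap pvDigitRun).filter (fun c => c ≠ '/'))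

-- ===== PRECONDITION & SPEC =====
def Spec_fen_to_64char (fen : String) (out : String) : Prop := out = fen_to_64char_alt fen
instance (fen : String) (out : String) : Decidable (Spec_fen_to_64char fen out) := by unfold Spec_fen_to_64char; infer_instance

-- ===== CLAIM (what is proved, stated in full; the proofs are below) =====
def Claim_equal_fen_to_64char : Prop := ∀ (fen : String), Dom_fen_to_64char fen → Spec_fen_to_64char fen (fen_to_64char fen)

-- ===== LEMMAS AND PROOFS =====
theorem fen_loop_eq (l : List Char) (acc : List Char) :
    l.foldl
      (fun brd c =>
        if PySem.Chars.isdigit c then brd ++ List.replicate (c.toNat - 48) 'x'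
        else if c ≠ '/' then brd ++ [c] else brd) acc
      = acc ++ (l.flatMap pvDigitRun).filter (fun c => c ≠ '/') := by
  induction l generalizing acc with
  | nil => simp
  | cons c t ih =>
    simp only [List.foldl_cons, List.flatMap_cons, List.filter_append, ih]
    by_cases hd : ('0' ≤ c ∧ c ≤ '9')
    · have h1 : PySem.Chars.isdigit c = true := by
        simp [PySem.Chars.isdigit, hd.1, hd.2]
      simp [pvDigitRun, h1, hd]
    · have h1 : PySem.Chars.isdigit c = false := by
        simp [PySem.Chars.isdigit]; exact fun h => lt_of_not_ge fun h2 => hd ⟨h, h2⟩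
      by_cases hs : c = '/'
      · simp [pvDigitRun, hs]
      · simp [pvDigitRun, h1, hd, hs]

-- ===== VERDICT (by name: the statement is the Claim_ definition above) =====
theorem fen_to_64char_spec : Claim_equal_fen_to_64char := by
  intro fen _
  unfold Spec_fen_to_64char fen_to_64char fen_to_64char_alt
  rw [fen_loop_eq]
  simp
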